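-- pv_equiv track=rewrite | github.com/MdAbedin/binarysearch | 0987 Number of Non-Overlapping Sublists With Sum of Target.py | solve
-- ===== SOURCE A (Python) =====
-- def solve(nums, target):
--     nums = [0]+nums
--     dp = [0]
--     lasts = {0:0}
--     psum = 0
--
--     for i in range(1,len(nums)):
--         ans = dp[-1]
--         psum += nums[i]
--
--         if psum-target in lasts: ans = max(ans, dp[lasts[psum-target]] + 1)
--
--         lasts[psum] = i
--         dp.append(ans)
--
--     return dp[-1]
-- ===== SOURCE B (Python) =====
-- def solve(nums, target):
--     seen = {0}
--     prefix = 0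
--     count = 0
--     for x in nums:
--         prefix += x
--         if prefix - target in seen:
--             count += 1
--             prefix = 0
--             seen = {0}
--         else:
--             seen.add(prefix)
--     return count
-- ===== Notes on version B (the rewrite author's own statement) =====
-- stated objective: alternative
-- what changed: Replaces the dp array + last-occurrence index map with the classic greedy: one running prefix sum, a count, and a set of prefix sums that is reset to {0} after each completed sublist.
import Mathlib
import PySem

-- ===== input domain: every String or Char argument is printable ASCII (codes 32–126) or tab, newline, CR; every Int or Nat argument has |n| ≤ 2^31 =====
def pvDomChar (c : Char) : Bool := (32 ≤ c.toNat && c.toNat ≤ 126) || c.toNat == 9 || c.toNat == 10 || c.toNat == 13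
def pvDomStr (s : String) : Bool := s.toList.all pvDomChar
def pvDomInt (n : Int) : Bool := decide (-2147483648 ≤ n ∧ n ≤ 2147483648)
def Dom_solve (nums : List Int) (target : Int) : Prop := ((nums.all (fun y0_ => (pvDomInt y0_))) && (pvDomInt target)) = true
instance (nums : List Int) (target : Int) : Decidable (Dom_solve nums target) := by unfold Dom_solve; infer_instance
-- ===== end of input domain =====

-- B replaces A's dp array + last-index dict with the classic greedy (prefix sum, count, seen-set reset at each cut); same O(n) pass, different state.

-- ===== PORT A =====
-- loop body of A's `for i in range(1, len(nums))`, reading nums[i] from the padded list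
def stepA (nums2 : List Int) (target : Int)
    (st : List Int × PySem.Dict Int Int × Int) (i : Int) :
    List Int × PySem.Dict Int Int × Int :=
  let dp := st.1
  let lasts := st.2.1
  let ans := PySem.List.pyGetD dp (-1) 0
  let psum := st.2.2 + PySem.List.pyGetD nums2 i 0
  let ans := if lasts.contains (psum - target) then
               max ans (PySem.List.pyGetD dp (lasts.getD (psum - target) 0) 0 + 1)
             else ans
  (dp ++ [ans], lasts.insert psum i, psum)

def solve (nums : List Int) (target : Int) : Int :=
  let nums2 := [0] ++ nums
  let st := (PySem.List.pyRange 1 ((nums2.length : Int)) 1).foldl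
              (stepA nums2 target) ([0], PySem.Dict.ofList [(0, 0)], 0)
  PySem.List.pyGetD st.1 (-1) 0

-- ===== PORT B =====
-- loop body of B's greedy pass: state (prefix, count, seen)
def stepB (target : Int) (st : Int × Int × PySem.Set Int) (x : Int) :
    Int × Int × PySem.Set Int :=
  let pfx := st.1 + x
  if PySem.Set.contains st.2.2 (pfx - target) then
    (0, st.2.1 + 1, PySem.Set.ofList [0])
  else
    (pfx, st.2.1, PySem.Set.add st.2.2 pfx)

def solve_alt (nums : List Int) (target : Int) : Int :=
  (nums.foldl (stepB target) (0, 0, PySem.Set.ofList [0])).2.1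

-- ===== PRECONDITION & SPEC =====
def Spec_solve (nums : List Int) (target : Int) (out : Int) : Prop := out = solve_alt nums target
instance (nums : List Int) (target : Int) (out : Int) : Decidable (Spec_solve nums target out) := by unfold Spec_solve; infer_instance

-- ===== CLAIM (what is proved, stated in full; the proofs are below) =====
def Claim_equal_solve : Prop := ∀ (nums : List Int) (target : Int), Dom_solve nums target → Spec_solve nums target (solve nums target)

-- ===== LEMMAS AND PROOFS =====

-- A's loop body with the element value substituted for the nums2-lookup
def stepAx (target : Int) (st : List Int × PySem.Dict Int Int × Int) (i x : Int) :
    List Int × PySem.Dict Int Int × Int :=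
  let dp := st.1
  let lasts := st.2.1
  let ans := PySem.List.pyGetD dp (-1) 0
  let psum := st.2.2 + x
  let ans := if lasts.contains (psum - target) then
               max ans (PySem.List.pyGetD dp (lasts.getD (psum - target) 0) 0 + 1)
             else ans
  (dp ++ [ans], lasts.insert psum i, psum)

-- A's loop as structural recursion over the remaining elements, carrying the index
def loopA (target : Int) : List Int → Int → (List Int × PySem.Dict Int Int × Int) → (List Int × PySem.Dict Int Int × Int)
  | [], _, st => st
  | x :: xs, k, st => loopA target xs (k + 1) (stepAx target st k x)

lemma bridgeA (target : Int) (full : List Int) :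
    ∀ (xs : List Int) (k : Int) (st : List Int × PySem.Dict Int Int × Int),
      0 ≤ k → full.drop k.toNat = xs →
      (PySem.List.pyRange k ((full.length : Int)) 1).foldl (stepA full target) st
        = loopA target xs k st := by
  intro xs
  induction xs with
  | nil =>
      intro k st hk hdrop
      have hlen : full.length ≤ k.toNat := List.drop_eq_nil_iff.mp hdrop
      rw [PySem.List.pyRange_one_eq_nil (by omega : (full.length : Int) ≤ k)]
      simp [loopA]
  | cons x xs ih =>
      intro k st hk hdrop
      have hklt : k.toNat < full.length := by
        by_contra hge
        rw [not_lt] at hge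
        rw [List.drop_eq_nil_iff.mpr hge] at hdrop
        exact absurd hdrop (by simp)
      have hget : full[k.toNat]? = some x := by
        have h1 : (full.drop k.toNat).head? = some x := by rw [hdrop]; rfl
        rwa [List.head?_drop] at h1
      have hx : PySem.List.pyGetD full k 0 = x := by
        rw [PySem.List.pyGetD_eq_getElem full 0 hk (by omega)]
        obtain ⟨hb, he⟩ := List.getElem?_eq_some_iff.mp hget
        exact he
      rw [PySem.List.pyRange_one_cons (by omega : k < (full.length : Int)), List.foldl_cons]
      have hstep : stepA full target st k = stepAx target st k x := by
        simp [stepA, stepAx, hx]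
      rw [hstep]
      refine ih (k + 1) _ (by omega) ?_
      have : (k + 1).toNat = k.toNat + 1 := by omega
      rw [this, ← List.drop_drop, hdrop]
      rfl

-- the simulation invariant between A's state and B's state (k = A's next loop index)
def SimRel (stA : List Int × PySem.Dict Int Int × Int) (stB : Int × Int × PySem.Set Int) (k : Int) : Prop :=
  k = (stA.1.length : Int) ∧
  stB.1 ∈ stB.2.2 ∧
  ∃ r : Nat, r < stA.1.length ∧
    (∀ (j : Nat) (h : j < stA.1.length),
        (r ≤ j → stA.1[j] = stB.2.1) ∧ (j < r → stA.1[j] + 1 ≤ stB.2.1)) ∧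
    (∀ s j, stA.2.1.get? s = some j →
        0 ≤ j ∧ j.toNat < stA.1.length ∧ (r ≤ j.toNat ↔ s - (stA.2.2 - stB.1) ∈ stB.2.2)) ∧
    (∀ v ∈ stB.2.2, (stA.2.1.get? (v + (stA.2.2 - stB.1))).isSome)

lemma simrel_step (target : Int) (stA : List Int × PySem.Dict Int Int × Int)
    (stB : Int × Int × PySem.Set Int) (k x : Int) (h : SimRel stA stB k) :
    SimRel (stepAx target stA k x) (stepB target stB x) (k + 1) := by
  obtain ⟨dp, lasts, psum⟩ := stA
  obtain ⟨pfx, count, seen⟩ := stB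
  obtain ⟨hk, hmem, r, hr, hdp, hL1, hL2⟩ := h
  dsimp only at hk hmem hr hdp hL1 hL2
  have hne : dp ≠ [] := List.ne_nil_of_length_pos (lt_of_le_of_lt (Nat.zero_le r) hr)
  have hlast : PySem.List.pyGetD dp (-1) 0 = count := by
    rw [PySem.List.pyGetD_neg_one dp 0 hne, List.getLast_eq_getElem]
    exact (hdp (dp.length - 1) (by omega)).1 (by omega)
  by_cases hB : (pfx + x - target) ∈ seen
  · -- greedy fires: A also increments
    have hsome : (lasts.get? (psum + x - target)).isSome := by
      have h0 := hL2 _ hB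
      have harg : pfx + x - target + (psum - pfx) = psum + x - target := by ring
      rwa [harg] at h0
    obtain ⟨j, hj⟩ := Option.isSome_iff_exists.mp hsome
    obtain ⟨hj0, hjlen, hjiff⟩ := hL1 _ _ hj
    have hjr : r ≤ j.toNat := by
      refine hjiff.mpr ?_
      have harg : psum + x - target - (psum - pfx) = pfx + x - target := by ring
      rw [harg]; exact hB
    have hdpj : PySem.List.pyGetD dp j 0 = count := by
      rw [PySem.List.pyGetD_eq_getElem dp 0 hj0 (by omega)]
      exact (hdp j.toNat hjlen).1 hjr
    have hcont : lasts.contains (psum + x - target) = true := by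
      rw [PySem.Dict.contains_eq_isSome_get?, hj]; rfl
    have hgetD : lasts.getD (psum + x - target) 0 = j :=
      PySem.Dict.getD_of_get?_eq_some lasts 0 hj
    have hAeq : stepAx target (dp, lasts, psum) k x
        = (dp ++ [count + 1], lasts.insert (psum + x) k, psum + x) := by
      simp [stepAx, hlast, hcont, hgetD, hdpj]
    have hcB : PySem.Set.contains seen (pfx + x - target) = true :=
      (PySem.Set.contains_iff seen _).mpr hB
    have hBeq : stepB target (pfx, count, seen) x = (0, count + 1, PySem.Set.ofList [0]) := by
      simp [stepB, hB]
    rw [hAeq, hBeq]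
    dsimp only [SimRel]
    refine ⟨by simp; omega, by simp [PySem.Set.mem_ofList], dp.length, by simp, ?_, ?_, ?_⟩
    · intro j2 h2
      have h2' : j2 < dp.length + 1 := by simpa using h2
      constructor
      · intro hge
        have : j2 = dp.length := by omega
        subst this
        simp
      · intro hlt
        have hle : dp[j2] ≤ count := by
          rcases Nat.lt_or_ge j2 r with hc2 | hc2
          · have := (hdp j2 (by omega)).2 hc2; omega
          · exact le_of_eq ((hdp j2 (by omega)).1 hc2)
        rw [List.getElem_append_left (by omega)]
        omega
    · intro s j2 hs
      rw [PySem.Dict.get?_insert] at hs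
      split_ifs at hs with hseq
      · cases hs
        subst hseq
        refine ⟨by omega, by simp; omega, ?_⟩
        refine iff_of_true (by omega) ?_
        have : psum + x - (psum + x - 0) = 0 := by ring
        rw [this, PySem.Set.mem_ofList]
        simp
      · obtain ⟨hj0', hjlen', hiff'⟩ := hL1 s j2 hs
        refine ⟨hj0', by simp; omega, ?_⟩
        refine iff_of_false (by omega) ?_
        rw [PySem.Set.mem_ofList]
        simp only [List.mem_singleton]
        intro h0
        exact hseq (by omega)
    · intro v hv
      rw [PySem.Set.mem_ofList] at hv
      simp only [List.mem_singleton] at hv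
      subst hv
      have : (0 : Int) + (psum + x - 0) = psum + x := by ring
      rw [this, PySem.Dict.get?_insert_self]
      rfl
  · -- greedy does not fire: A keeps the count
    have hcB : ¬ (PySem.Set.contains seen (pfx + x - target) = true) :=
      fun hcc => hB ((PySem.Set.contains_iff seen _).mp hcc)
    have hansA : (if lasts.contains (psum + x - target) = true then
        max count (PySem.List.pyGetD dp (lasts.getD (psum + x - target) 0) 0 + 1)
      else count) = count := by
      cases hLK : lasts.get? (psum + x - target) with
      | none =>
          rw [if_neg]
          rw [PySem.Dict.contains_eq_isSome_get?, hLK]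
          simp
      | some j =>
          obtain ⟨hj0, hjlen, hjiff⟩ := hL1 _ _ hLK
          have hjr : j.toNat < r := by
            by_contra hge
            rw [not_lt] at hge
            apply hB
            have harg : psum + x - target - (psum - pfx) = pfx + x - target := by ring
            rw [← harg]
            exact hjiff.mp hge
          have hdpj : PySem.List.pyGetD dp j 0 + 1 ≤ count := by
            rw [PySem.List.pyGetD_eq_getElem dp 0 hj0 (by omega)]
            exact (hdp j.toNat hjlen).2 hjr
          have hcont : lasts.contains (psum + x - target) = true := by
            rw [PySem.Dict.contains_eq_isSome_get?, hLK]; rfl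
          rw [if_pos hcont, PySem.Dict.getD_of_get?_eq_some lasts 0 hLK]
          exact max_eq_left hdpj
    have hAeq : stepAx target (dp, lasts, psum) k x
        = (dp ++ [count], lasts.insert (psum + x) k, psum + x) := by
      simp only [stepAx, hlast]
      rw [hansA]
    have hBeq : stepB target (pfx, count, seen) x
        = (pfx + x, count, PySem.Set.add seen (pfx + x)) := by
      simp [stepB, hB]
    rw [hAeq, hBeq]
    dsimp only [SimRel]
    refine ⟨by simp; omega, (PySem.Set.mem_add seen _ _).mpr (Or.inr rfl), r, by simp; omega, ?_, ?_, ?_⟩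
    · intro j2 h2
      have h2' : j2 < dp.length + 1 := by simpa using h2
      rcases Nat.lt_or_ge j2 dp.length with hlt | hge
      · constructor
        · intro hrj
          rw [List.getElem_append_left (by omega)]
          exact (hdp j2 hlt).1 hrj
        · intro hjr
          rw [List.getElem_append_left (by omega)]
          exact (hdp j2 hlt).2 hjr
      · have : j2 = dp.length := by omega
        subst this
        constructor
        · intro _; simp
        · intro hjr; exact absurd hjr (by omega)
    · intro s j2 hs
      rw [PySem.Dict.get?_insert] at hs
      have hbase : psum + x - (pfx + x) = psum - pfx := by ring
      split_ifs at hs with hseq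
      · cases hs
        subst hseq
        refine ⟨by omega, by simp; omega, ?_⟩
        refine iff_of_true (by omega) ?_
        have : psum + x - (psum + x - (pfx + x)) = pfx + x := by ring
        rw [this]
        exact (PySem.Set.mem_add seen _ _).mpr (Or.inr rfl)
      · obtain ⟨hj0', hjlen', hiff'⟩ := hL1 s j2 hs
        refine ⟨hj0', by simp; omega, ?_⟩
        rw [hbase, PySem.Set.mem_add]
        rw [hiff']
        constructor
        · exact Or.inl
        · rintro (hin | heq)
          · exact hin
          · exact absurd (by omega : s = psum + x) hseq
    · intro v hv
      rw [PySem.Set.mem_add] at hv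
      have hbase : psum + x - (pfx + x) = psum - pfx := by ring
      rw [hbase]
      rcases hv with hin | heq
      · rw [PySem.Dict.get?_insert]
        split_ifs with hveq
        · rfl
        · exact hL2 v hin
      · subst heq
        have : pfx + x + (psum - pfx) = psum + x := by ring
        rw [this, PySem.Dict.get?_insert_self]
        rfl

lemma simrel_loop (target : Int) :
    ∀ (xs : List Int) (k : Int) (stA : List Int × PySem.Dict Int Int × Int)
      (stB : Int × Int × PySem.Set Int), SimRel stA stB k →
      SimRel (loopA target xs k stA) (xs.foldl (stepB target) stB) (k + xs.length) := by
  intro xs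
  induction xs with
  | nil => intro k stA stB h; simpa [loopA] using h
  | cons x xs ih =>
      intro k stA stB h
      have h' := simrel_step target stA stB k x h
      have := ih (k + 1) _ _ h'
      simpa [loopA, List.foldl_cons, add_assoc, add_comm, add_left_comm] using this

lemma simrel_init : SimRel ([0], PySem.Dict.ofList [(0, 0)], 0) (0, 0, PySem.Set.ofList [0]) 1 := by
  refine ⟨by simp, by simp [PySem.Set.mem_ofList], 0, by simp, ?_, ?_, ?_⟩
  · intro j h
    have : j = 0 := by
      have h1 : j < 1 := by simpa using h
      omega
    subst this
    exact ⟨fun _ => rfl, fun h' => absurd h' (Nat.lt_irrefl 0)⟩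
  · intro s j hs
    have hd : PySem.Dict.ofList [((0 : Int), (0 : Int))] = ⟨[((0 : Int), (0 : Int))]⟩ := rfl
    rw [hd, PySem.Dict.get?_mk_cons] at hs
    by_cases h0 : s = 0
    · subst h0
      simp only [beq_self_eq_true, if_pos] at hs
      cases hs
      refine ⟨le_refl 0, by simp, ?_⟩
      simp [PySem.Set.mem_ofList]
    · have : ((0 : Int) == s) = false := by simpa using fun h => h0 h.symm
      rw [this] at hs
      simp at hs
      cases hs
  · intro v hv
    rw [PySem.Set.mem_ofList] at hv
    simp only [List.mem_singleton] at hv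
    subst hv
    have : (0 : Int) + (0 - 0) = 0 := by ring
    rw [this]
    rfl

-- ===== VERDICT (by name: the statement is the Claim_ definition above) =====
theorem solve_spec : Claim_equal_solve := by
  intro nums target _
  show solve nums target = solve_alt nums target
  unfold solve solve_alt
  dsimp only
  rw [bridgeA target ([0] ++ nums) nums 1 _ (by omega) (by simp)]
  have h := simrel_loop target nums 1 ([0], PySem.Dict.ofList [(0, 0)], 0)
              (0, 0, PySem.Set.ofList [0]) simrel_init
  obtain ⟨hk, -, r, hr, hdp, -, -⟩ := h
  set stA := loopA target nums 1 ([0], PySem.Dict.ofList [(0, 0)], 0) with hstA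
  set stB := nums.foldl (stepB target) (0, 0, PySem.Set.ofList [0]) with hstB
  have hne : stA.1 ≠ [] := by
    intro hnil
    rw [hnil] at hr
    simp at hr
  rw [PySem.List.pyGetD_neg_one stA.1 0 hne]
  rw [List.getLast_eq_getElem]
  exact (hdp (stA.1.length - 1) (by omega)).1 (by omega)
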